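-- pv_equiv track=rewrite | github.com/bavalpey/codefights | core/labrynthOfNestedLoops/weakNumbers.py | weakNumbers
-- ===== SOURCE A (Python) =====
-- def divisors(n):
--     factors = {}
--     nn = n
--     i = 2
--     while i*i <= nn:
--         while nn % i == 0:
--             if not i in factors:
--                 factors[i] = 0
--             factors[i] += 1
--             nn //= i
--         i += 1
--     if nn > 1:
--         factors[nn] = 1
--
--     primes = list(factors.keys())
--
--     # generates factors from primes[k:] subset
--     def generate(k):
--         if k == len(primes):
--             yield 1
--         else:
--             rest = generate(k+1)
--             prime = primes[k]
--             for factor in rest: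
--                 prime_to_i = 1
--                 for _ in range(factors[prime] + 1):
--                     yield factor * prime_to_i
--                     prime_to_i *= prime
--
--     for factor in generate(0):
--         yield factor
--
-- def weakness(x):
--     return len(list(divisors(x)))
--
-- def weakNumbers(n):
--     divisors_map = list(map(weakness, range(1,n+1)))
--     maximum = 0
--     weakness_map = [0]*n
--     num = 0
--     for i in range(1,len(divisors_map)):
--         if not divisors_map[i] > max(divisors_map[:i]):
--             count = 0
--             for x in divisors_map[:i]:
--                 if x > divisors_map[i]:
--                     count += 1
--             if count == maximum:
--                 num += 1
--             elif count > maximum: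
--                 num = 1
--                 maximum = count
--     if maximum == 0:
--         return [0,n]
--     return [maximum,num]
-- ===== SOURCE B (Python) =====
-- def weakNumbers(n):
--     # divisor count by trial-division product of (exponent+1), no dict/generator
--     def numDivisors(x):
--         nn = x
--         count = 1
--         i = 2
--         while i * i <= nn:
--             e = 0
--             while nn % i == 0:
--                 e += 1
--                 nn //= i
--             count *= e + 1
--             i += 1
--         if nn > 1:
--             count *= 2
--         return count
--
--     values = [numDivisors(x) for x in range(1, n + 1)]
--     # one pass: weakness(i) = i - (# earlier values <= values[i]), via a frequency table
--     freq = {}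
--     weaknesses = []
--     for i, v in enumerate(values):
--         le = sum(c for u, c in freq.items() if u <= v)
--         weaknesses.append(i - le)
--         freq[v] = freq.get(v, 0) + 1
--     m = max(weaknesses, default=0)
--     if m == 0:
--         return [0, n]
--     return [m, weaknesses.count(m)]
-- ===== Notes on version B (the rewrite author's own statement) =====
-- stated objective: faster
-- what changed: Divisor counts come from a plain trial-division product of (exponent+1) instead of A's dict-plus-recursive-generator divisor enumeration, and the quadratic main loop (max over a growing slice plus an inner rescan per element) is replaced by one pass that keeps a frequency table of earlier divisor counts and derives each weakness as i minus the number of earlier counts <= current, finishing with max/count on the weakness list.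
import Mathlib
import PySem

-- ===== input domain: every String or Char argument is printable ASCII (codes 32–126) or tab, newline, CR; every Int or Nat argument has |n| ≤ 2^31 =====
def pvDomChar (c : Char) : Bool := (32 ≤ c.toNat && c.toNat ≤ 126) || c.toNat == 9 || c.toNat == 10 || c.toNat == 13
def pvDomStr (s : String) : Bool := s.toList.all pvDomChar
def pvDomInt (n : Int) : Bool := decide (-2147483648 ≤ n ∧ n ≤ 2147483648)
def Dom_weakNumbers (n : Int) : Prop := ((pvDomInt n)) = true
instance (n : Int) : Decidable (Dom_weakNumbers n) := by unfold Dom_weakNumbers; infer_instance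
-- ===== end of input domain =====

-- B computes divisor counts as a plain trial-division product of (exponent+1) and derives each
-- weakness in one pass from a frequency table of earlier counts, replacing A's recursive divisor
-- generator and its quadratic rescanning main loop (objective: faster; equality proved below).

-- ===== PORT A =====
-- inner `while nn % i == 0` of divisors(); structural recursion on a fuel that counts the
-- remaining divisions (nn shrinks by a factor ≥ 2 each pass, so nn.toNat steps always suffice;
-- the fuel-0 branch is never reached from the call sites below)
def pvAInner (fuel : Nat) (d : PySem.Dict Int Int) (nn i : Int) : PySem.Dict Int Int × Int :=
  match fuel with
  | 0 => (d, nn)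
  | fuel + 1 =>
    if PySem.Int.mod nn i = 0 then
      let d1 := if d.contains i then d else d.insert i 0
      pvAInner fuel (d1.insert i (d1.getD i 0 + 1)) (PySem.Int.floordiv nn i) i
    else (d, nn)

-- outer `while i*i <= nn` of divisors(); i grows by 1 per pass and never exceeds nn
def pvAOuter (fuel : Nat) (d : PySem.Dict Int Int) (nn i : Int) : PySem.Dict Int Int × Int :=
  match fuel with
  | 0 => (d, nn)
  | fuel + 1 =>
    if i * i ≤ nn then
      let r := pvAInner nn.toNat d nn i
      pvAOuter fuel r.1 r.2 (i + 1)
    else (d, nn)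

-- `prime_to_i = 1; for _ in range(factors[prime]+1): yield factor*prime_to_i; prime_to_i *= prime`
def pvAEmit (factor p cur : Int) : Nat → List Int
  | 0 => []
  | k + 1 => factor * cur :: pvAEmit factor p (cur * p) k

-- generate(k): divisors built from primes[k:]; factors[prime] looked up in the dict (always present)
def pvAGen (d : PySem.Dict Int Int) : List Int → List Int
  | [] => [1]
  | p :: ps => (pvAGen d ps).flatMap (fun factor => pvAEmit factor p 1 (d.getD p 0 + 1).toNat)

-- list(divisors(x)): trial-divide, add the leftover prime, enumerate divisors from the factor dict
def pvADivisors (x : Int) : List Int :=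
  let r := pvAOuter (x.toNat + 1) PySem.Dict.empty x 2
  let d := if 1 < r.2 then r.1.insert r.2 1 else r.1
  pvAGen d d.keys

def pvAWeakness (x : Int) : Int := (pvADivisors x).length

def weakNumbers (n : Int) : List Int :=
  let dm := (PySem.List.pyRange 1 (n + 1) 1).map pvAWeakness
  -- `weakness_map = [0]*n` is written but never read; omitted
  let r := (PySem.List.pyRange 1 (dm.length : Int) 1).foldl
    (fun (st : Int × Int) i =>
      let v := PySem.List.pyGetD dm i 0                                   -- divisors_map[i]; i in range
      let mx := (PySem.List.max? (PySem.List.slice dm none (some i)) (fun x => x)).getD 0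
        -- max(divisors_map[:i]); the slice is non-empty (i ≥ 1), so the default is never used
      if ¬ (v > mx) then
        let count := (PySem.List.slice dm none (some i)).foldl
          (fun c x => if x > v then c + 1 else c) 0
        if count = st.1 then (st.1, st.2 + 1)
        else if count > st.1 then (count, 1)
        else st
      else st)
    ((0 : Int), (0 : Int))
  if r.1 = 0 then [0, n] else [r.1, r.2]

-- ===== PORT B =====
-- inner division loop of numDivisors; same fuel scheme as pvAInner
def pvBInner (fuel : Nat) (e nn i : Int) : Int × Int :=
  match fuel with
  | 0 => (e, nn)
  | fuel + 1 =>
    if PySem.Int.mod nn i = 0 then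
      pvBInner fuel (e + 1) (PySem.Int.floordiv nn i) i
    else (e, nn)

def pvBOuter (fuel : Nat) (count nn i : Int) : Int × Int :=
  match fuel with
  | 0 => (count, nn)
  | fuel + 1 =>
    if i * i ≤ nn then
      let r := pvBInner nn.toNat 0 nn i
      pvBOuter fuel (count * (r.1 + 1)) r.2 (i + 1)
    else (count, nn)

def pvNumDivisors (x : Int) : Int :=
  let r := pvBOuter (x.toNat + 1) 1 x 2
  if 1 < r.2 then r.1 * 2 else r.1

def weakNumbers_alt (n : Int) : List Int :=
  let values := (PySem.List.pyRange 1 (n + 1) 1).map pvNumDivisors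
  let st := (PySem.List.enumerate values 0).foldl
    (fun (st : PySem.Dict Int Int × List Int) p =>
      let le := (((st.1.items.filter (fun q => q.1 ≤ p.2)).map (fun q => q.2)).sum)
      (st.1.insert p.2 (st.1.getD p.2 0 + 1), st.2 ++ [p.1 - le]))
    (PySem.Dict.empty, [])
  let ws := st.2
  let m := (PySem.List.max? ws (fun x => x)).getD 0
  if m = 0 then [0, n] else [m, (PySem.List.count ws m : Int)]

-- ===== PRECONDITION & SPEC =====
def Spec_weakNumbers (n : Int) (out : List Int) : Prop := out = weakNumbers_alt n
instance (n : Int) (out : List Int) : Decidable (Spec_weakNumbers n out) := by unfold Spec_weakNumbers; infer_instance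

-- ===== CLAIM (what is proved, stated in full; the proofs are below) =====
def Claim_equal_weakNumbers : Prop := ∀ (n : Int), Dom_weakNumbers n → Spec_weakNumbers n (weakNumbers n)

-- ===== LEMMAS AND PROOFS =====

-- ===== phase 1: pvNumDivisors = pvAWeakness =====

-- one exact division step
lemma pvDivStep (nn i : Int) (hi : 2 ≤ i) (hnn : 0 < nn) (hm : PySem.Int.mod nn i = 0) :
    0 < PySem.Int.floordiv nn i ∧ PySem.Int.floordiv nn i < nn ∧ i * PySem.Int.floordiv nn i = nn := by
  have hdvd : i ∣ nn := (PySem.Int.mod_eq_zero_iff_dvd nn i).mp hm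
  have h0 : PySem.Int.floordiv nn i = nn / i := PySem.Int.floordiv_eq_ediv_of_pos (by omega)
  have h1 : i * (nn / i) = nn := Int.mul_ediv_cancel' hdvd
  have h2 : 0 < nn / i := by nlinarith [h1]
  have h3 : nn / i < nn := by nlinarith [h1]
  exact ⟨by omega, by omega, by rw [h0]; exact h1⟩

lemma pvBInner_shift (fuel : Nat) (e nn i : Int) :
    pvBInner fuel e nn i = (e + (pvBInner fuel 0 nn i).1, (pvBInner fuel 0 nn i).2) := by
  induction fuel generalizing e nn with
  | zero => simp [pvBInner]
  | succ fuel ih =>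
    by_cases h : PySem.Int.mod nn i = 0
    · simp only [pvBInner, if_pos h]
      rw [ih (e + 1), ih (0 + 1)]
      simp only [Prod.mk.injEq]
      exact ⟨by ring, trivial⟩
    · simp [pvBInner, if_neg h]

lemma pvBInner_facts (fuel : Nat) (e nn i : Int) :
    2 ≤ i → 0 < nn → nn.toNat ≤ fuel →
    e ≤ (pvBInner fuel e nn i).1 ∧ 0 < (pvBInner fuel e nn i).2 ∧
      (pvBInner fuel e nn i).2 ∣ nn ∧
      PySem.Int.mod (pvBInner fuel e nn i).2 i ≠ 0 := by
  induction fuel generalizing e nn with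
  | zero => intro hi hnn hf; omega
  | succ fuel ih =>
    intro hi hnn hf
    by_cases h : PySem.Int.mod nn i = 0
    · have hs := pvDivStep nn i hi hnn h
      have hf' : (PySem.Int.floordiv nn i).toNat ≤ fuel := by omega
      obtain ⟨i1, i2, i3, i4⟩ := ih (e + 1) (PySem.Int.floordiv nn i) hi hs.1 hf'
      simp only [pvBInner, if_pos h]
      refine ⟨by omega, i2, ?_, i4⟩
      exact dvd_trans i3 ⟨i, by linarith [hs.2.2]⟩
    · simp only [pvBInner, if_neg h]
      exact ⟨le_refl e, hnn, dvd_refl nn, h⟩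

-- a dict re-insert of the value already stored is the identity
lemma pvInsert_getD_self (d : PySem.Dict Int Int) (k : Int) (hnod : d.keys.Nodup)
    (hc : d.contains k = true) (v : Int) (hv : d.getD k 0 = v) : d.insert k v = d := by
  apply PySem.Dict.ext
  rw [PySem.Dict.items_insert_of_contains d v hc]
  have hmap : ∀ p ∈ d.items, (fun p : Int × Int => if (p.1 == k) = true then (k, v) else p) p = p := by
    intro p hp
    by_cases hpk : p.1 = k
    · have hmem : (k, p.2) ∈ d.items := by rw [← hpk]; exact hp
      have hv2 := PySem.Dict.getD_of_mem_items d hmem hnod 0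
      rw [hv] at hv2
      simp only [hpk, beq_self_eq_true, if_true]
      rw [hv2, ← hpk]
    · simp [hpk]
  rw [List.map_congr_left hmap]
  simp

lemma pvAInner_contains (fuel : Nat) (i nn : Int) (d : PySem.Dict Int Int) (j : Int)
    (hi : 2 ≤ i) (hnn : 0 < nn) (hf : nn.toNat ≤ fuel) (hnod : d.keys.Nodup)
    (hc : d.contains i = true) (hj : d.getD i 0 = j) :
    pvAInner fuel d nn i
      = (d.insert i (j + (pvBInner fuel 0 nn i).1), (pvBInner fuel 0 nn i).2) := by
  induction fuel generalizing nn d j with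
  | zero => omega
  | succ fuel ih =>
    by_cases h : PySem.Int.mod nn i = 0
    · have hs := pvDivStep nn i hi hnn h
      have hf' : (PySem.Int.floordiv nn i).toNat ≤ fuel := by omega
      have hrec := ih (PySem.Int.floordiv nn i) (d.insert i (j + 1)) (j + 1)
        hs.1 hf' (PySem.Dict.nodup_keys_insert d i (j + 1) hnod)
        (PySem.Dict.contains_insert_self d i (j + 1))
        (PySem.Dict.getD_insert_self d i (j + 1) 0)
      simp only [pvAInner, if_pos h, hc, if_true]
      rw [hj, hrec, PySem.Dict.insert_insert_self]
      have hB : pvBInner (fuel + 1) 0 nn i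
          = pvBInner fuel (0 + 1) (PySem.Int.floordiv nn i) i := by
        simp [pvBInner, if_pos h]
      rw [hB, pvBInner_shift fuel (0 + 1)]
      simp only [Prod.mk.injEq]
      exact ⟨by congr 1; ring, trivial⟩
    · simp only [pvAInner, if_neg h, pvBInner]
      simp only [Prod.mk.injEq]
      exact ⟨by rw [pvInsert_getD_self d i hnod hc (j + 0) (by omega)], trivial⟩

lemma pvAInner_fresh (fuel : Nat) (i nn : Int) (d : PySem.Dict Int Int)
    (hi : 2 ≤ i) (hnn : 0 < nn) (hf : nn.toNat ≤ fuel) (hnod : d.keys.Nodup)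
    (hc : d.contains i = false) :
    pvAInner fuel d nn i =
      ((if (pvBInner fuel 0 nn i).1 = 0 then d else d.insert i (pvBInner fuel 0 nn i).1),
       (pvBInner fuel 0 nn i).2) := by
  rcases fuel with _ | fuel
  · omega
  by_cases h : PySem.Int.mod nn i = 0
  · have hs := pvDivStep nn i hi hnn h
    have hf' : (PySem.Int.floordiv nn i).toNat ≤ fuel := by omega
    have hcnt := (pvBInner_facts fuel 0 (PySem.Int.floordiv nn i) i hi hs.1 hf').1
    simp only [pvAInner, if_pos h, hc, Bool.false_eq_true, if_false]
    rw [PySem.Dict.getD_insert_self, PySem.Dict.insert_insert_self]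
    rw [pvAInner_contains fuel i (PySem.Int.floordiv nn i) (d.insert i (0 + 1)) (0 + 1)
      hi hs.1 hf' (PySem.Dict.nodup_keys_insert d i (0 + 1) hnod)
      (PySem.Dict.contains_insert_self d i (0 + 1))
      (PySem.Dict.getD_insert_self d i (0 + 1) 0)]
    rw [PySem.Dict.insert_insert_self]
    have hB : pvBInner (fuel + 1) 0 nn i
        = pvBInner fuel (0 + 1) (PySem.Int.floordiv nn i) i := by
      simp [pvBInner, if_pos h]
    rw [hB, pvBInner_shift fuel (0 + 1)]
    rw [if_neg (by omega)]
  · simp only [pvAInner, if_neg h, pvBInner]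
    simp

-- product of (exponent+1) over the factor dict — what B's running `count` maintains
def pvP (d : PySem.Dict Int Int) : Int := (d.items.map (fun q => q.2 + 1)).prod

lemma pvP_insert_fresh (d : PySem.Dict Int Int) (k v : Int) (hc : d.contains k = false) :
    pvP (d.insert k v) = pvP d * (v + 1) := by
  unfold pvP
  rw [PySem.Dict.items_insert_of_not_contains d v hc]
  simp

lemma pvOuter_par (fuel : Nat) (nn i : Int) (d : PySem.Dict Int Int)
    (hi : 2 ≤ i) (hnn : 0 < nn) (hf : (nn + 1 - i).toNat ≤ fuel) (hnod : d.keys.Nodup)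
    (hinv : ∀ q ∈ d.items, 1 ≤ q.2 ∧ PySem.Int.mod nn q.1 ≠ 0 ∧ q.1 < i) :
    pvBOuter fuel (pvP d) nn i = (pvP (pvAOuter fuel d nn i).1, (pvAOuter fuel d nn i).2) ∧
    (pvAOuter fuel d nn i).1.keys.Nodup ∧
    (∀ q ∈ (pvAOuter fuel d nn i).1.items,
      1 ≤ q.2 ∧ PySem.Int.mod (pvAOuter fuel d nn i).2 q.1 ≠ 0) := by
  induction fuel generalizing nn i d with
  | zero =>
    exact ⟨rfl, hnod, fun q hq => ⟨(hinv q hq).1, (hinv q hq).2.1⟩⟩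
  | succ fuel ih =>
    by_cases h : i * i ≤ nn
    · -- i is not yet a key: every key is < i
      have hc : d.contains i = false := by
        by_contra hcc
        have hct : d.contains i = true := by revert hcc; cases d.contains i <;> simp
        have hk := (PySem.Dict.contains_iff_mem_keys d i).mp hct
        obtain ⟨q, hq, hq1⟩ := List.mem_map.mp hk
        exact absurd (hq1 ▸ (hinv q hq).2.2) (lt_irrefl i)
      obtain ⟨hcn, hrp, hrd, hrm⟩ := pvBInner_facts nn.toNat 0 nn i hi hnn (le_refl _)
      have hAin := pvAInner_fresh nn.toNat i nn d hi hnn (le_refl _) hnod hc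
      set c := (pvBInner nn.toNat 0 nn i).1 with hcdef
      set rem := (pvBInner nn.toNat 0 nn i).2 with hremdef
      have hPd : pvP (pvAInner nn.toNat d nn i).1 = pvP d * (c + 1) := by
        rw [hAin]
        by_cases hc0 : c = 0
        · simp [hc0]
        · simp only [if_neg hc0]
          exact pvP_insert_fresh d i c hc
      have hnod' : (pvAInner nn.toNat d nn i).1.keys.Nodup := by
        rw [hAin]
        by_cases hc0 : c = 0
        · simpa [hc0] using hnod
        · simp only [if_neg hc0]
          exact PySem.Dict.nodup_keys_insert d i c hnod
      have hinv' : ∀ q ∈ (pvAInner nn.toNat d nn i).1.items,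
          1 ≤ q.2 ∧ PySem.Int.mod rem q.1 ≠ 0 ∧ q.1 < i + 1 := by
        intro q hq
        rw [hAin] at hq
        have hold : ∀ q ∈ d.items, 1 ≤ q.2 ∧ PySem.Int.mod rem q.1 ≠ 0 ∧ q.1 < i + 1 := by
          intro q hq
          obtain ⟨h1, h2, h3⟩ := hinv q hq
          refine ⟨h1, ?_, by omega⟩
          intro hm
          exact h2 ((PySem.Int.mod_eq_zero_iff_dvd nn q.1).mpr
            (dvd_trans ((PySem.Int.mod_eq_zero_iff_dvd rem q.1).mp hm) hrd))
        by_cases hc0 : c = 0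
        · rw [if_pos hc0] at hq; exact hold q hq
        · rw [if_neg hc0, PySem.Dict.items_insert_of_not_contains d c hc] at hq
          rcases List.mem_append.mp hq with hq | hq
          · exact hold q hq
          · simp only [List.mem_singleton] at hq
            subst hq
            exact ⟨by omega, hrm, by omega⟩
      have hsnd : (pvAInner nn.toNat d nn i).2 = rem := by rw [hAin]
      have hrle : rem ≤ nn := Int.le_of_dvd hnn hrd
      have hile : i ≤ nn := by nlinarith
      have hf' : (rem + 1 - (i + 1)).toNat ≤ fuel := by omega
      have ihr := ih rem (i + 1) (pvAInner nn.toNat d nn i).1 (by omega) hrp hf' hnod' hinv'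
      simp only [pvAOuter, pvBOuter, if_pos h]
      simp only [← hcdef, ← hremdef, hsnd]
      rw [← hPd]
      exact ihr
    · have hA : pvAOuter (fuel + 1) d nn i = (d, nn) := by
        simp only [pvAOuter, if_neg h]
      have hB : pvBOuter (fuel + 1) (pvP d) nn i = (pvP d, nn) := by
        simp only [pvBOuter, if_neg h]
      rw [hA, hB]
      exact ⟨rfl, hnod, fun q hq => ⟨(hinv q hq).1, (hinv q hq).2.1⟩⟩

lemma pvAEmit_length (f p c : Int) (k : Nat) : (pvAEmit f p c k).length = k := by
  induction k generalizing c with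
  | zero => rfl
  | succ k ih => simp [pvAEmit, ih]

lemma pvAGen_length (d : PySem.Dict Int Int) (ps : List Int) :
    ((pvAGen d ps).length : Int) = (ps.map (fun p => (((d.getD p 0 + 1).toNat : Nat) : Int))).prod := by
  induction ps with
  | nil => simp [pvAGen]
  | cons p ps ih =>
    rw [pvAGen]
    rw [List.length_flatMap]
    have hmap : (pvAGen d ps).map (fun factor => (pvAEmit factor p 1 (d.getD p 0 + 1).toNat).length)
        = (pvAGen d ps).map (fun _ => (d.getD p 0 + 1).toNat) := by
      apply List.map_congr_left
      intro x _
      exact pvAEmit_length x p 1 _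
    rw [hmap, List.map_const', List.sum_replicate, smul_eq_mul, List.map_cons, List.prod_cons,
      ← ih]
    push_cast
    ring

lemma pvCastProd (l : List (Int × Int)) (h : ∀ q ∈ l, 1 ≤ q.2) :
    (l.map (fun q => (((q.2 + 1).toNat : Nat) : Int))).prod = (l.map (fun q => q.2 + 1)).prod := by
  induction l with
  | nil => rfl
  | cons q l ih =>
    simp only [List.map_cons, List.prod_cons]
    rw [ih (fun q hq => h q (List.mem_cons_of_mem _ hq)),
      Int.toNat_of_nonneg (by linarith [h q List.mem_cons_self])]

lemma pvLen_eq_pvP (d : PySem.Dict Int Int) (hnod : d.keys.Nodup)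
    (hent : ∀ q ∈ d.items, 1 ≤ q.2) :
    ((pvAGen d d.keys).length : Int) = pvP d := by
  have h1 : ((pvAGen d d.keys).length : Int)
      = (d.items.map (fun q => (((q.2 + 1).toNat : Nat) : Int))).prod := by
    rw [pvAGen_length, PySem.Dict.items_eq_map_keys d hnod 0, List.map_map]
    rfl
  rw [h1, pvCastProd d.items hent]
  rfl

lemma pvNumDivisors_eq (x : Int) : pvNumDivisors x = pvAWeakness x := by
  by_cases hx : 0 < x
  · obtain ⟨heq, hnod, hinv⟩ := pvOuter_par (x.toNat + 1) x 2 PySem.Dict.empty (by omega) hx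
      (by omega) PySem.Dict.nodup_keys_empty (by intro q hq; simp [PySem.Dict.empty] at hq)
    simp only [pvNumDivisors, pvAWeakness, pvADivisors]
    set dA := (pvAOuter (x.toNat + 1) PySem.Dict.empty x 2).1 with hdA
    set remA := (pvAOuter (x.toNat + 1) PySem.Dict.empty x 2).2 with hremA
    have hP1 : pvP PySem.Dict.empty = 1 := by rfl
    rw [hP1] at heq
    rw [heq]
    by_cases hr : 1 < remA
    · have hcA : dA.contains remA = false := by
        by_contra hcc
        have hct : dA.contains remA = true := by revert hcc; cases dA.contains remA <;> simp
        obtain ⟨q, hq, hq1⟩ := List.mem_map.mp ((PySem.Dict.contains_iff_mem_keys dA remA).mp hct)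
        have h2 := (hinv q hq).2
        rw [hq1] at h2
        exact h2 ((PySem.Int.mod_eq_zero_iff_dvd remA remA).mpr (dvd_refl remA))
      rw [if_pos hr, if_pos hr]
      have hnod2 := PySem.Dict.nodup_keys_insert dA remA 1 hnod
      have hent2 : ∀ q ∈ (dA.insert remA 1).items, 1 ≤ q.2 := by
        intro q hq
        rw [PySem.Dict.items_insert_of_not_contains dA 1 hcA] at hq
        rcases List.mem_append.mp hq with hq | hq
        · exact (hinv q hq).1
        · simp only [List.mem_singleton] at hq; subst hq; norm_num
      rw [pvLen_eq_pvP _ hnod2 hent2, pvP_insert_fresh dA remA 1 hcA]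
      ring
    · rw [if_neg hr, if_neg hr]
      rw [pvLen_eq_pvP dA hnod (fun q hq => (hinv q hq).1)]
  · have hx1 : ¬ (1:Int) < x := by omega
    have hx0 : x.toNat = 0 := by omega
    simp only [pvNumDivisors, pvAWeakness, pvADivisors, hx0]
    simp only [pvAOuter, pvBOuter]
    rw [if_neg (show ¬ (2:Int) * 2 ≤ x by omega), if_neg (show ¬ (2:Int) * 2 ≤ x by omega)]
    simp only
    rw [if_neg hx1, if_neg hx1]
    rfl

-- ===== phase 2: the two main loops compute the same [maximum, num] =====

-- weakness of position k: how many earlier entries are strictly larger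
def pvW (dm : List Int) (k : Nat) : Int :=
  (((dm.take k).filter (fun x => decide (dm.getD k 0 < x))).length : Int)

lemma pvW_nonneg (dm : List Int) (k : Nat) : 0 ≤ pvW dm k := Int.natCast_nonneg _

lemma pvW_zero (dm : List Int) : pvW dm 0 = 0 := by simp [pvW]

lemma pvW_append (dm : List Int) (v : Int) (k : Nat) (hk : k < dm.length) :
    pvW (dm ++ [v]) k = pvW dm k := by
  unfold pvW
  rw [List.take_append_of_le_length (by omega)]
  congr 2
  apply List.filter_congr
  intro x _
  congr 1
  rw [List.getD_eq_getElem?_getD, List.getD_eq_getElem?_getD, List.getElem?_append_left hk]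

lemma pvW_last (dm : List Int) (v : Int) :
    pvW (dm ++ [v]) dm.length = ((dm.filter (fun x => decide (v < x))).length : Int) := by
  unfold pvW
  rw [List.take_left]
  congr 2
  apply List.filter_congr
  intro x _
  congr 1
  rw [List.getD_eq_getElem?_getD, List.getElem?_append_right (le_refl _)]
  simp

-- the filtered sum over the frequency dict that B uses for `le`
def pvFS (d : PySem.Dict Int Int) (v : Int) : Int :=
  ((d.items.filter (fun q => decide (q.1 ≤ v))).map (fun q => q.2)).sum

lemma pvMapReplaceSum (l : List (Int × Int)) (x w v : Int)
    (hnod : (l.map (fun q : Int × Int => q.1)).Nodup) (hmem : (x, w) ∈ l) :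
    (((l.map (fun p : Int × Int => if (p.1 == x) = true then (x, w + 1) else p)).filter
        (fun q => decide (q.1 ≤ v))).map (fun q => q.2)).sum
      = ((l.filter (fun q => decide (q.1 ≤ v))).map (fun q => q.2)).sum
        + (if x ≤ v then 1 else 0) := by
  induction l with
  | nil => simp at hmem
  | cons p l ih =>
    simp only [List.map_cons, List.nodup_cons] at hnod
    rcases List.mem_cons.mp hmem with hpx | hpx
    · subst hpx
      have hmap : l.map (fun p : Int × Int => if (p.1 == x) = true then (x, w + 1) else p) = l := by
        have hcg : ∀ q ∈ l, (fun p : Int × Int => if (p.1 == x) = true then (x, w + 1) else p) q = q := by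
          intro q hq
          have hne : q.1 ≠ x := by
            intro he
            have hx : q.1 ∈ l.map (fun q : Int × Int => q.1) :=
              List.mem_map_of_mem hq
            rw [he] at hx
            exact hnod.1 hx
          simp [hne]
        rw [List.map_congr_left hcg]
        simp
      simp only [List.map_cons, beq_self_eq_true, if_true, hmap]
      rw [List.filter_cons, List.filter_cons]
      by_cases hv : x ≤ v
      · rw [if_pos (by simp [hv]), if_pos (by simp [hv]), if_pos hv]
        simp only [List.map_cons, List.sum_cons]
        ring
      · rw [if_neg (by simp [hv]), if_neg (by simp [hv]), if_neg hv]
        omega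
    · have hne : p.1 ≠ x := by
        intro he
        have hx : x ∈ l.map (fun q : Int × Int => q.1) :=
          List.mem_map_of_mem hpx
        rw [← he] at hx
        exact hnod.1 hx
      have hhead : (if (p.1 == x) = true then (x, w + 1) else p) = p := by simp [hne]
      simp only [List.map_cons, hhead]
      rw [List.filter_cons, List.filter_cons]
      by_cases hv : p.1 ≤ v
      · rw [if_pos (by simp [hv]), if_pos (by simp [hv])]
        simp only [List.map_cons, List.sum_cons]
        rw [ih hnod.2 hpx]
        ring
      · rw [if_neg (by simp [hv]), if_neg (by simp [hv])]
        exact ih hnod.2 hpx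

lemma pvFS_insert (d : PySem.Dict Int Int) (x v : Int) (hnod : d.keys.Nodup) :
    pvFS (d.insert x (d.getD x 0 + 1)) v = pvFS d v + (if x ≤ v then 1 else 0) := by
  by_cases hc : d.contains x = true
  · have hmem : (x, d.getD x 0) ∈ d.items := by
      have hs : d.get? x = some (d.getD x 0) := by
        rcases h : d.get? x with _ | w
        · rw [PySem.Dict.contains_eq_isSome_get?] at hc
          rw [h] at hc
          simp at hc
        · rw [PySem.Dict.getD_eq_get?_getD, h]
          rfl
      exact (PySem.Dict.get?_eq_some_iff_mem_items d x _ hnod).mp hs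
    unfold pvFS
    rw [PySem.Dict.items_insert_of_contains d _ hc]
    exact pvMapReplaceSum d.items x (d.getD x 0) v hnod hmem
  · have hc' : d.contains x = false := by revert hc; cases d.contains x <;> simp
    unfold pvFS
    rw [PySem.Dict.items_insert_of_not_contains d _ hc', List.filter_append]
    rw [PySem.Dict.getD_of_not_contains d 0 hc']
    by_cases hv : x ≤ v
    · simp [hv]
    · simp [hv]

lemma pvFS_foldl (us : List Int) (v : Int) :
    ∀ d : PySem.Dict Int Int, d.keys.Nodup →
    pvFS (us.foldl (fun d x => d.insert x (d.getD x 0 + 1)) d) v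
      = pvFS d v + ((us.filter (fun x => decide (x ≤ v))).length : Int) := by
  induction us with
  | nil => intro d _; simp
  | cons x us ih =>
    intro d hnod
    simp only [List.foldl_cons]
    rw [ih _ (PySem.Dict.nodup_keys_insert d x _ hnod), pvFS_insert d x v hnod]
    by_cases hv : x ≤ v
    · simp [hv]
      ring
    · simp [hv]

-- B's pass produces exactly the weakness list
lemma pvBFold (vs : List Int) :
    (PySem.List.enumerate vs 0).foldl
      (fun (st : PySem.Dict Int Int × List Int) p =>
        let le := (((st.1.items.filter (fun q => q.1 ≤ p.2)).map (fun q => q.2)).sum)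
        (st.1.insert p.2 (st.1.getD p.2 0 + 1), st.2 ++ [p.1 - le]))
      (PySem.Dict.empty, [])
    = (vs.foldl (fun d x => d.insert x (d.getD x 0 + 1)) PySem.Dict.empty,
       (List.range vs.length).map (fun k => pvW vs k)) := by
  induction vs using List.reverseRecOn with
  | nil => rfl
  | append_singleton us v ih =>
    rw [PySem.List.enumerate_append, List.foldl_append, ih,
      PySem.List.enumerate_cons, PySem.List.enumerate_nil, List.foldl_cons, List.foldl_nil]
    have hnodF : (us.foldl (fun d x => d.insert x (d.getD x 0 + 1)) PySem.Dict.empty).keys.Nodup :=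
      PySem.Dict.nodup_keys_foldl_insert us _ _ PySem.Dict.nodup_keys_empty
    have hfs := pvFS_foldl us v PySem.Dict.empty PySem.Dict.nodup_keys_empty
    have hfs0 : pvFS PySem.Dict.empty v = 0 := rfl
    rw [hfs0, zero_add] at hfs
    have hle : (((us.foldl (fun d x => d.insert x (d.getD x 0 + 1)) PySem.Dict.empty).items.filter
        (fun q => q.1 ≤ v)).map (fun q => q.2)).sum
        = ((us.filter (fun x => decide (x ≤ v))).length : Int) := hfs
    simp only [List.foldl_append, List.foldl_cons, List.foldl_nil]
    refine Prod.ext rfl ?_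
    simp only [hle, List.length_append, List.length_cons, List.length_nil]
    have hrange : List.range (us.length + (0 + 1)) = List.range us.length ++ [us.length] := by
      simp [List.range_succ]
    rw [hrange, List.map_append]
    have hmapcg : (List.range us.length).map (fun k => pvW (us ++ [v]) k)
        = (List.range us.length).map (fun k => pvW us k) := by
      apply List.map_congr_left
      intro j hj
      exact pvW_append us v j (List.mem_range.mp hj)
    rw [hmapcg, List.map_cons, List.map_nil, pvW_last]
    congr 1
    have hpart : us.length = (us.filter (fun x => decide (x ≤ v))).length
        + (us.filter (fun x => decide (v < x))).length := by
      rw [← List.countP_eq_length_filter, ← List.countP_eq_length_filter,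
        us.length_eq_countP_add_countP (fun x => decide (x ≤ v))]
      congr 1
      apply List.countP_congr
      intro x _
      by_cases hx : x ≤ v
      · simp [hx, not_lt.mpr hx]
      · simp [hx, not_le.mp hx]
    simp only [List.cons.injEq, and_true]
    push_cast [hpart]
    ring

-- A-side bookkeeping
def pvMxP (dm : List Int) (k : Nat) : Int := (PySem.List.max? (dm.take k) (fun x => x)).getD 0

def pvMk (dm : List Int) (k : Nat) : Int := ((List.range k).map (fun j => pvW dm j)).foldl max 0

def pvInS (dm : List Int) (k : Nat) : Bool :=
  decide (1 ≤ k) && ! decide (pvMxP dm k < dm.getD k 0)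

def pvNk (dm : List Int) (k : Nat) : Int :=
  (((List.range k).filter (fun j => pvInS dm j && decide (pvW dm j = pvMk dm k))).length : Int)

lemma pvMk_nonneg (dm : List Int) (k : Nat) : 0 ≤ pvMk dm k :=
  (PySem.List.le_foldl_max ((List.range k).map (fun j => pvW dm j)) 0).1

lemma pvW_le_pvMk (dm : List Int) (j k : Nat) (hj : j < k) : pvW dm j ≤ pvMk dm k :=
  (PySem.List.le_foldl_max ((List.range k).map (fun j => pvW dm j)) 0).2 _
    (List.mem_map_of_mem (List.mem_range.mpr hj))

lemma pvMk_succ (dm : List Int) (k : Nat) :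
    pvMk dm (k + 1) = max (pvMk dm k) (pvW dm k) := by
  unfold pvMk
  rw [List.range_succ, List.map_append, List.foldl_append]
  simp

lemma pvW_record (dm : List Int) (k : Nat) (h1 : 1 ≤ k) (hk : k ≤ dm.length)
    (hrec : pvMxP dm k < dm.getD k 0) : pvW dm k = 0 := by
  have hne : dm.take k ≠ [] := by
    intro h
    have := congrArg List.length h
    simp only [List.length_take, List.length_nil] at this
    omega
  rcases hmax : PySem.List.max? (dm.take k) (fun x => x) with _ | m
  · exact absurd ((PySem.List.max?_eq_none_iff _ _).mp hmax) hne
  · have hisMax := PySem.List.max?_isMax hmax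
    have hmx : pvMxP dm k = m := by unfold pvMxP; rw [hmax]; rfl
    rw [hmx] at hrec
    unfold pvW
    have hfil : (dm.take k).filter (fun x => decide (dm.getD k 0 < x)) = [] := by
      rw [List.filter_eq_nil_iff]
      intro x hx
      have hxm := hisMax x hx
      simp only [decide_eq_true_eq]
      omega
    rw [hfil]
    rfl

-- A's loop over indices 1..k-1 maintains (pvMk, pvNk)
lemma pvAFold (dm : List Int) (k : Nat) (hk : k ≤ dm.length) :
    (PySem.List.pyRange 1 (k : Int) 1).foldl
      (fun (st : Int × Int) i =>
        let v := PySem.List.pyGetD dm i 0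
        let mx := (PySem.List.max? (PySem.List.slice dm none (some i)) (fun x => x)).getD 0
        if ¬ (v > mx) then
          let count := (PySem.List.slice dm none (some i)).foldl
            (fun c x => if x > v then c + 1 else c) 0
          if count = st.1 then (st.1, st.2 + 1)
          else if count > st.1 then (count, 1)
          else st
        else st)
      ((0 : Int), (0 : Int))
    = (pvMk dm k, pvNk dm k) := by
  induction k with
  | zero =>
    rw [PySem.List.pyRange_one_eq_nil (by omega)]
    simp [pvMk, pvNk]
  | succ k ih =>
    have hk' : k ≤ dm.length := by omega
    rcases Nat.eq_zero_or_pos k with hk0 | hkpos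
    · subst hk0
      rw [show ((0 + 1 : Nat) : Int) = 1 by norm_num, PySem.List.pyRange_one_eq_nil (by omega)]
      simp [pvMk, pvNk, pvInS, pvW_zero]
    · have hcast : ((k + 1 : Nat) : Int) = (k : Int) + 1 := by push_cast; ring
      rw [hcast, PySem.List.pyRange_one_succ_right (by exact_mod_cast hkpos), List.foldl_append,
        ih hk', List.foldl_cons, List.foldl_nil]
      simp only [PySem.List.pyGetD_natCast, PySem.List.slice_to_natCast]
      have hmx : (PySem.List.max? (dm.take k) (fun x => x)).getD 0 = pvMxP dm k := rfl
      rw [hmx]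
      have hcnt : (dm.take k).foldl (fun c x => if x > dm.getD k 0 then c + 1 else c) 0
          = pvW dm k := by
        have hshape : (fun (c x : Int) => if x > dm.getD k 0 then c + 1 else c)
            = (fun (c x : Int) =>
                if (fun x => decide (dm.getD k 0 < x)) x = true then c + 1 else c) := by
          funext c x
          by_cases hx : dm.getD k 0 < x <;> simp [hx]
        rw [hshape, PySem.List.foldl_count_if, List.countP_eq_length_filter]
        simp [pvW]
      by_cases hcond : pvMxP dm k < dm.getD k 0
      · -- record: the element is skipped, its weakness is 0
        rw [if_neg (not_not_intro hcond)]
        have hW0 : pvW dm k = 0 := pvW_record dm k hkpos hk' hcond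
        have hMk : pvMk dm (k + 1) = pvMk dm k := by
          rw [pvMk_succ, hW0]
          exact max_eq_left (pvMk_nonneg dm k)
        have hS : pvInS dm k = false := by
          simp only [pvInS, Bool.and_eq_false_iff]
          right
          simp only [Bool.not_eq_false', decide_eq_true_eq]
          exact hcond
        have hNk : pvNk dm (k + 1) = pvNk dm k := by
          unfold pvNk
          rw [hMk, List.range_succ, List.filter_append]
          simp [hS]
        rw [hMk, hNk]
      · rw [if_pos hcond, hcnt]
        have hS : pvInS dm k = true := by
          simp only [pvInS, Bool.and_eq_true, decide_eq_true_eq, Bool.not_eq_true', decide_eq_false_iff_not]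
          exact ⟨hkpos, hcond⟩
        have hMk := pvMk_succ dm k
        by_cases he : pvW dm k = pvMk dm k
        · rw [if_pos he]
          have hMk' : pvMk dm (k + 1) = pvMk dm k := by
            rw [hMk, he]
            exact max_self _
          have hNk : pvNk dm (k + 1) = pvNk dm k + 1 := by
            unfold pvNk
            rw [hMk', List.range_succ, List.filter_append]
            simp [hS, he]
          rw [hMk', hNk]
        · rw [if_neg he]
          by_cases hgt : pvW dm k > pvMk dm k
          · rw [if_pos hgt]
            have hMk' : pvMk dm (k + 1) = pvW dm k := by
              rw [hMk]
              exact max_eq_right (le_of_lt hgt)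
            have hNk : pvNk dm (k + 1) = 1 := by
              unfold pvNk
              rw [hMk', List.range_succ, List.filter_append]
              have hnil : (List.range k).filter
                  (fun j => pvInS dm j && decide (pvW dm j = pvW dm k)) = [] := by
                rw [List.filter_eq_nil_iff]
                intro j hj
                have hle := pvW_le_pvMk dm j k (List.mem_range.mp hj)
                simp only [Bool.and_eq_true, decide_eq_true_eq, not_and]
                intro _
                omega
              rw [hnil]
              simp [hS]
            rw [hMk', hNk]
          · rw [if_neg hgt]
            have hlt : pvW dm k < pvMk dm k := by
              rcases lt_trichotomy (pvW dm k) (pvMk dm k) with h | h | h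
              · exact h
              · exact absurd h he
              · exact absurd h hgt
            have hMk' : pvMk dm (k + 1) = pvMk dm k := by
              rw [hMk]
              exact max_eq_left (le_of_lt hlt)
            have hNk : pvNk dm (k + 1) = pvNk dm k := by
              unfold pvNk
              rw [hMk', List.range_succ, List.filter_append]
              simp [he]
            rw [hMk', hNk]

-- max(ws, default=0) is the running max from 0 when all entries are ≥ 0
lemma pvMaxD (ws : List Int) (h : ∀ y ∈ ws, 0 ≤ y) :
    (PySem.List.max? ws (fun x => x)).getD 0 = ws.foldl max 0 := by
  cases ws with
  | nil => rfl
  | cons w t =>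
    rw [PySem.List.max?_id_cons]
    simp only [Option.getD_some, List.foldl_cons]
    congr 1
    exact (max_eq_right (h w List.mem_cons_self)).symm

lemma pvMain (n : Int) : weakNumbers n = weakNumbers_alt n := by
  simp only [weakNumbers, weakNumbers_alt]
  have hvals : (PySem.List.pyRange 1 (n + 1) 1).map pvNumDivisors
      = (PySem.List.pyRange 1 (n + 1) 1).map pvAWeakness :=
    List.map_congr_left (fun x _ => pvNumDivisors_eq x)
  rw [hvals]
  generalize (PySem.List.pyRange 1 (n + 1) 1).map pvAWeakness = dm
  rw [pvBFold dm, pvAFold dm dm.length (le_refl _)]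
  have hm : (PySem.List.max? ((List.range dm.length).map (fun k => pvW dm k)) (fun x => x)).getD 0
      = pvMk dm dm.length := by
    rw [pvMaxD]
    · rfl
    · intro y hy
      obtain ⟨j, _, rfl⟩ := List.mem_map.mp hy
      exact pvW_nonneg dm j
  simp only [hm]
  by_cases h0 : pvMk dm dm.length = 0
  · simp [h0]
  · rw [if_neg h0, if_neg h0]
    have hMpos : 0 < pvMk dm dm.length := lt_of_le_of_ne (pvMk_nonneg dm dm.length) (Ne.symm h0)
    have hcnt : pvNk dm dm.length
        = ((PySem.List.count ((List.range dm.length).map (fun k => pvW dm k))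
            (pvMk dm dm.length) : Nat) : Int) := by
      rw [PySem.List.count_eq,
        show List.count (pvMk dm dm.length) ((List.range dm.length).map (fun k => pvW dm k))
          = List.countP (fun x => x == pvMk dm dm.length)
              ((List.range dm.length).map (fun k => pvW dm k)) from rfl,
        List.countP_map]
      unfold pvNk
      rw [← List.countP_eq_length_filter]
      congr 1
      apply List.countP_congr
      intro j hj
      have hjlen : j < dm.length := List.mem_range.mp hj
      by_cases hw : pvW dm j = pvMk dm dm.length
      · have hj1 : 1 ≤ j := by
          rcases Nat.eq_zero_or_pos j with hj0 | hj0
          · rw [hj0, pvW_zero] at hw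
            omega
          · exact hj0
        have hnr : ¬ pvMxP dm j < dm.getD j 0 := by
          intro hrec
          rw [pvW_record dm j hj1 (le_of_lt hjlen) hrec] at hw
          omega
        have hS : pvInS dm j = true := by
          simp only [pvInS, Bool.and_eq_true, decide_eq_true_eq, Bool.not_eq_true',
            decide_eq_false_iff_not]
          exact ⟨hj1, hnr⟩
        simp [hS, hw]
      · simp [hw]
    rw [hcnt]

-- ===== VERDICT (by name: the statement is the Claim_ definition above) =====
theorem weakNumbers_spec : Claim_equal_weakNumbers := by
  intro n _
  unfold Spec_weakNumbers
  exact pvMain n
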